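-- pv_equiv track=rewrite | github.com/BBQlettuce/aoc_2020 | day_11/day11_2.py | _dcol
-- ===== SOURCE A (Python) =====
-- def _dcol(s_map, row, col):
--     next_col = col - 1
--     while next_col >= 0:
--         next_visible = s_map[row][next_col]
--         if next_visible == '#':
--             return [row, next_col]
--         if next_visible == 'L':
--             return None
--         next_col -= 1
--     return None
-- ===== SOURCE B (Python) =====
-- def _last_index(seats, ch):
--     # index of the last occurrence of ch in seats, -1 if absent (one forward pass)
--     i = -1
--     j = 0
--     for c in seats:
--         if c == ch:
--             i = j
--         j += 1
--     return i
--
--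
-- def _dcol(s_map, row, col):
--     if col <= 0:
--         return None
--     seats = s_map[row][:col]
--     i_hash = _last_index(seats, '#')
--     i_L = _last_index(seats, 'L')
--     return [row, i_hash] if i_hash > i_L else None
-- ===== Notes on version B (the rewrite author's own statement) =====
-- stated objective: alternative
-- what changed: Replaces A's backward while-loop with early returns by slicing the cells left of col and comparing the last-occurrence indices of '#' and 'L' computed by two forward passes (no early exit, no backward scan).
import Mathlib
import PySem

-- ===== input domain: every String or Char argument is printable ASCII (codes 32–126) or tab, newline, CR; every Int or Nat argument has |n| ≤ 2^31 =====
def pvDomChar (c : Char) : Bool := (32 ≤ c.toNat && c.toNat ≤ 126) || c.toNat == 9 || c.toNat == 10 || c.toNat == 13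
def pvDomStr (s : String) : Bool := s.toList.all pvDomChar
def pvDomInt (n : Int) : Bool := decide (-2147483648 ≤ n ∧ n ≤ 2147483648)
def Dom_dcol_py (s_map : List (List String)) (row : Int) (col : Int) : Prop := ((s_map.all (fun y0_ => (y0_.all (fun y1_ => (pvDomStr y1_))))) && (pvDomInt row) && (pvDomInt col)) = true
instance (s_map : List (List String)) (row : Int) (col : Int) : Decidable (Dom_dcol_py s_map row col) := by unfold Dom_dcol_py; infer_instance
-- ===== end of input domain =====

-- B replaces A's backward early-exit while-loop by slicing the cells left of col and comparing
-- the last-occurrence indices of '#' and 'L' (two forward passes); same cost, different algorithm.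

-- ===== PORT A =====
-- A's while loop: next_col runs col-1, col-2, …, 0; fuel n means next_col = n - 1.
def dcolGoA (s_map : List (List String)) (row : Int) : Nat → Option (List Int)
  | 0 => none
  | n + 1 =>
    match (PySem.List.pyGet? s_map row).bind (fun r => PySem.List.pyGet? r (n : Int)) with
    | none => none  -- IndexError in Python; outside Pre_
    | some c =>
      if c = "#" then some [row, (n : Int)]
      else if c = "L" then none
      else dcolGoA s_map row n

def dcol_py (s_map : List (List String)) (row : Int) (col : Int) : Option (List Int) :=
  dcolGoA s_map row col.toNat

-- ===== PORT B =====
-- _last_index: forward pass keeping (last index seen, running position)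
def lastIdxB (seats : List String) (ch : String) : Int :=
  (seats.foldl (fun (p : Int × Int) c => (if c = ch then p.2 else p.1, p.2 + 1)) (-1, 0)).1

def dcol_py_alt (s_map : List (List String)) (row : Int) (col : Int) : Option (List Int) :=
  if col ≤ 0 then none
  else
    match PySem.List.pyGet? s_map row with
    | none => none  -- IndexError in Python; outside Pre_
    | some r =>
      let seats := PySem.List.slice r none (some col)
      let iHash := lastIdxB seats "#"
      let iL := lastIdxB seats "L"
      if iHash > iL then some [row, iHash] else none

-- ===== PRECONDITION & SPEC =====
-- Pre_ excludes exactly the inputs where A raises IndexError: it touches s_map[row][col-1]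
-- whenever col ≥ 1, so then row must be a valid (possibly negative) index and col ≤ len(s_map[row]).
def Pre_dcol_py (s_map : List (List String)) (row : Int) (col : Int) : Prop :=
  col ≤ 0 ∨ ((PySem.List.pyGet? s_map row).isSome ∧ 1 ≤ col ∧
             col ≤ (((PySem.List.pyGet? s_map row).getD []).length : Int))
instance (s_map : List (List String)) (row : Int) (col : Int) : Decidable (Pre_dcol_py s_map row col) := by unfold Pre_dcol_py; infer_instance

def pvWitness_dcol_py : List (List String) × Int × Int := ([[".", "#", "L", "."]], 0, 3)

def Spec_dcol_py (s_map : List (List String)) (row : Int) (col : Int) (out : Option (List Int)) : Prop := out = dcol_py_alt s_map row col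
instance (s_map : List (List String)) (row : Int) (col : Int) (out : Option (List Int)) : Decidable (Spec_dcol_py s_map row col out) := by unfold Spec_dcol_py; infer_instance

-- ===== CLAIM (what is proved, stated in full; the proofs are below) =====
def Claim_equal_dcol_py : Prop := ∀ (s_map : List (List String)) (row : Int) (col : Int), Dom_dcol_py s_map row col → Pre_dcol_py s_map row col → Spec_dcol_py s_map row col (dcol_py s_map row col)

-- ===== LEMMAS AND PROOFS =====

theorem lastIdxB_snd (seats : List String) (ch : String) (i j : Int) :
    (seats.foldl (fun (p : Int × Int) c => (if c = ch then p.2 else p.1, p.2 + 1)) (i, j)).2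
      = j + seats.length := by
  induction seats generalizing i j with
  | nil => simp
  | cons c t ih => simp [List.foldl_cons, ih]; omega

theorem lastIdxB_append (xs : List String) (a ch : String) :
    lastIdxB (xs ++ [a]) ch = if a = ch then (xs.length : Int) else lastIdxB xs ch := by
  unfold lastIdxB
  rw [List.foldl_append]
  simp only [List.foldl_cons, List.foldl_nil]
  rw [lastIdxB_snd xs ch (-1) 0]
  split <;> simp

theorem lastIdxB_lt (seats : List String) (ch : String) :
    lastIdxB seats ch < (seats.length : Int) := by
  induction seats using List.reverseRecOn with
  | nil => simp [lastIdxB]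
  | append_singleton xs a ih =>
    rw [lastIdxB_append]
    simp only [List.length_append, List.length_cons, List.length_nil]
    split
    · push_cast; omega
    · push_cast; omega

-- the core invariant: A's backward scan with fuel n computes B's formula on the prefix r.take n
theorem goA_eq (s_map : List (List String)) (row : Int) (r : List String)
    (hr : PySem.List.pyGet? s_map row = some r) :
    ∀ n : Nat, n ≤ r.length →
      dcolGoA s_map row n =
        (if lastIdxB (r.take n) "#" > lastIdxB (r.take n) "L"
         then some [row, lastIdxB (r.take n) "#"] else none) := by
  intro n
  induction n with
  | zero => intro _; simp [dcolGoA, lastIdxB]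
  | succ n ih =>
    intro hn
    have hlt : n < r.length := by omega
    have hget : PySem.List.pyGet? r (n : Int) = some r[n] :=
      PySem.List.pyGet?_ofNat r n hlt
    have htake : r.take (n + 1) = r.take n ++ [r[n]] := by
      rw [List.take_add_one]
      simp [List.getElem?_eq_getElem hlt]
    have hlen : ((r.take n).length : Int) = (n : Int) := by
      simp [List.length_take, Nat.min_eq_left (le_of_lt hlt)]
    have hH := lastIdxB_lt (r.take n) "#"
    have hL := lastIdxB_lt (r.take n) "L"
    rw [hlen] at hH hL
    rw [htake, lastIdxB_append, lastIdxB_append, hlen]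
    unfold dcolGoA
    rw [hr]
    simp only [Option.bind_some, hget]
    by_cases h1 : r[n] = "#"
    · simp [h1]
      omega
    · by_cases h2 : r[n] = "L"
      · simp [h2]
        omega
      · simp [h1, h2]
        exact ih (by omega)

-- ===== VERDICT (by name: the statement is the Claim_ definition above) =====
theorem dcol_py_spec : Claim_equal_dcol_py := by
  intro s_map row col _ hpre
  unfold Spec_dcol_py dcol_py dcol_py_alt
  by_cases hc : col ≤ 0
  · have : col.toNat = 0 := by omega
    rw [this, if_pos hc]
    simp [dcolGoA]
  · rw [if_neg hc]
    rcases hpre with h | ⟨hsome, _, hlen⟩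
    · exact absurd h hc
    · obtain ⟨r, hr⟩ := Option.isSome_iff_exists.mp hsome
      rw [hr]
      simp only
      have hslice : PySem.List.slice r none (some col) = r.take col.toNat :=
        PySem.List.slice_to r (by omega : (0:Int) ≤ col)
      rw [hslice]
      have hle : col.toNat ≤ r.length := by
        rw [hr] at hlen; simp at hlen; omega
      exact goA_eq s_map row r hr col.toNat hle
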